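-- pv_equiv track=rewrite | github.com/AV3S-NTF/Logia | etap2/Ex2_LOGIA07.py | ilez
-- ===== SOURCE A (Python) =====
-- def ilez(word):
--     lonelyLetters = 0
--     lonely0 = 0
--     lonely1 = 0
--
--     length = len(word)
--
--     for i in range(0, length):
--         if (word[i] == "a" or word[i] == "e" or word[i] == "i" or word[i] == "o" or word[i] == "u" or word[i] == "y"):
--             if (lonelyLetters == 0):
--                 lonelyLetters += 1
--                 lonely0 = i
--             else:
--                 lonelyLetters += 1
--                 lonely1 = i
--
--     if (lonelyLetters == 0):
--         return -2
--     elif (lonelyLetters == 1):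
--         return -1
--     else:
--         return lonely1 - (lonely0 + 1)
-- ===== SOURCE B (Python) =====
-- def ilez(word):
--     vowels = ('a', 'e', 'i', 'o', 'u', 'y')
--     n = len(word)
--     first = -1
--     for i in range(n):
--         if word[i] in vowels:
--             first = i
--             break
--     if first == -1:
--         return -2
--     last = -1
--     for i in range(n - 1, -1, -1):
--         if word[i] in vowels:
--             last = i
--             break
--     if first == last:
--         return -1
--     return last - first - 1
-- ===== Notes on version B (the rewrite author's own statement) =====
-- stated objective: simpler
-- what changed: Replaces A's full-word vowel-counting loop with two opposite-direction early-break scans for the first and last vowel index, dropping the counter (first==last iff exactly one vowel).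
import Mathlib
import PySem

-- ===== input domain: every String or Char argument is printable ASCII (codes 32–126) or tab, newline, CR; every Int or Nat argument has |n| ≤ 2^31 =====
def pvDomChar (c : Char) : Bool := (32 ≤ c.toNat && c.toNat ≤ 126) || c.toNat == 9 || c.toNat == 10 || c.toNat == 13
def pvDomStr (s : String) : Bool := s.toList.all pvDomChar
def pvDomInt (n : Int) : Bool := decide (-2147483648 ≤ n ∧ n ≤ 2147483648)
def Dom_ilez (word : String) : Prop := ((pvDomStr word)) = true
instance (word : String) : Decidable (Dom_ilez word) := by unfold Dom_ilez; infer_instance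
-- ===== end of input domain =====

-- B replaces A's single counting pass by two opposite-direction early-break scans (simpler: no vowel counter).

-- ===== PORT A =====
-- A's vowel test: the literal or-chain of char comparisons
def pvVowelChain (c : Char) : Bool :=
  c == 'a' || c == 'e' || c == 'i' || c == 'o' || c == 'u' || c == 'y'

def ilez (word : String) : Int :=
  let length : Int := PySem.Str.len word
  let st :=
    (PySem.List.pyRange 0 length 1).foldl
      (fun (st : Int × Int × Int) i =>
        match PySem.Str.pyGet? word i with
        | some c =>
            if pvVowelChain c then
              if st.1 = 0 then (st.1 + 1, i, st.2.2) else (st.1 + 1, st.2.1, i)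
            else st
        | none => st)  -- unreachable: i ranges over 0..len-1
      (0, 0, 0)
  if st.1 = 0 then -2 else if st.1 = 1 then -1 else st.2.2 - (st.2.1 + 1)

-- ===== PORT B =====
def pvVowelsTup : List Char := ['a', 'e', 'i', 'o', 'u', 'y']

-- forward scan with break: index of the first vowel, -1 if none
def pvFirstScan (cs : List Char) (i : Int) : Int :=
  match cs with
  | [] => -1
  | c :: r => if pvVowelsTup.contains c then i else pvFirstScan r (i + 1)

-- backward scan with break (for i in range(n-1,-1,-1)): rs is the reversed word, j the current index
def pvLastScan (rs : List Char) (j : Int) : Int :=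
  match rs with
  | [] => -1
  | c :: r => if pvVowelsTup.contains c then j else pvLastScan r (j - 1)

def ilez_alt (word : String) : Int :=
  let n : Int := PySem.Str.len word
  let first := pvFirstScan word.toList 0
  if first = -1 then -2
  else
    let last := pvLastScan word.toList.reverse (n - 1)
    if first = last then -1 else last - first - 1

-- ===== PRECONDITION & SPEC =====
def Spec_ilez (word : String) (out : Int) : Prop := out = ilez_alt word
instance (word : String) (out : Int) : Decidable (Spec_ilez word out) := by unfold Spec_ilez; infer_instance

-- ===== CLAIM (what is proved, stated in full; the proofs are below) =====
def Claim_equal_ilez : Prop := ∀ (word : String), Dom_ilez word → Spec_ilez word (ilez word)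

-- ===== LEMMAS AND PROOFS =====

-- the list of indices (starting at i) of the vowels of cs
def vIdx : List Char → Int → List Int
  | [], _ => []
  | c :: r, i => if pvVowelChain c then i :: vIdx r (i + 1) else vIdx r (i + 1)

-- A's loop as structural recursion over the suffix still to process
def loopA : List Char → Int → (Int × Int × Int) → (Int × Int × Int)
  | [], _, st => st
  | c :: r, i, st =>
      loopA r (i + 1)
        (if pvVowelChain c then
          if st.1 = 0 then (st.1 + 1, i, st.2.2) else (st.1 + 1, st.2.1, i)
         else st)

lemma contains_eq_chain (c : Char) : pvVowelsTup.contains c = pvVowelChain c := by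
  simp [pvVowelsTup, pvVowelChain, Bool.or_assoc, beq_eq_decide]

lemma getLastD_cons (x b : Int) (l : List Int) : (x :: l).getLast?.getD b = l.getLast?.getD x := by
  cases l with
  | nil => simp
  | cons y t => simp [List.getLast?_cons]

lemma vIdx_ge : ∀ (cs : List Char) (i x : Int), x ∈ vIdx cs i → i ≤ x := by
  intro cs
  induction cs with
  | nil => intro i x h; simp [vIdx] at h
  | cons c r ih =>
      intro i x h
      simp only [vIdx] at h
      split at h
      · rcases List.mem_cons.1 h with h | h
        · omega
        · have := ih (i + 1) x h; omega
      · have := ih (i + 1) x h; omega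

lemma vIdx_append : ∀ (xs ys : List Char) (i : Int),
    vIdx (xs ++ ys) i = vIdx xs i ++ vIdx ys (i + xs.length) := by
  intro xs
  induction xs with
  | nil => intro ys i; simp [vIdx]
  | cons c r ih =>
      intro ys i
      simp only [List.cons_append, vIdx, ih, List.length_cons]
      split <;> simp <;> ring_nf

lemma loopA_pos : ∀ (cs : List Char) (i n a b : Int), 0 < n →
    loopA cs i (n, a, b) = (n + (vIdx cs i).length, a, (vIdx cs i).getLast?.getD b) := by
  intro cs
  induction cs with
  | nil => intro i n a b _; simp [loopA, vIdx]
  | cons c r ih =>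
      intro i n a b hn
      simp only [loopA, vIdx]
      by_cases hv : pvVowelChain c
      · simp only [hv, if_true, if_neg (by omega : ¬ n = 0)]
        rw [ih (i + 1) (n + 1) a i (by omega), getLastD_cons]
        simp only [List.length_cons, Prod.mk.injEq]
        exact ⟨by push_cast; ring, trivial⟩
      · simp only [hv, if_false, Bool.false_eq_true]
        exact ih (i + 1) n a b hn

lemma loopA_zero : ∀ (cs : List Char) (i : Int),
    loopA cs i (0, 0, 0) =
      match vIdx cs i with
      | [] => (0, 0, 0)
      | k :: rest => (1 + (rest.length : Int), k, rest.getLast?.getD 0) := by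
  intro cs
  induction cs with
  | nil => intro i; simp [loopA, vIdx]
  | cons c r ih =>
      intro i
      simp only [loopA, vIdx]
      by_cases hv : pvVowelChain c
      · simp only [hv, if_true, zero_add]
        rw [loopA_pos r (i + 1) 1 i 0 (by omega)]
      · simp only [hv, if_false, Bool.false_eq_true]
        exact ih (i + 1)

lemma firstScan_eq : ∀ (cs : List Char) (i : Int),
    pvFirstScan cs i = (vIdx cs i).head?.getD (-1) := by
  intro cs
  induction cs with
  | nil => intro i; simp [pvFirstScan, vIdx]
  | cons c r ih =>
      intro i
      simp only [pvFirstScan, vIdx, contains_eq_chain]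
      by_cases hv : pvVowelChain c
      · simp [hv]
      · simp [hv, ih (i + 1)]

lemma lastScan_eq : ∀ (rs : List Char) (j : Int),
    pvLastScan rs j = (vIdx rs.reverse (j + 1 - rs.length)).getLast?.getD (-1) := by
  intro rs
  induction rs with
  | nil => intro j; simp [pvLastScan, vIdx]
  | cons c r ih =>
      intro j
      simp only [pvLastScan, contains_eq_chain, List.reverse_cons]
      rw [vIdx_append]
      have h1 : j + 1 - ((c :: r).length : Int) + (r.reverse.length : Int) = j := by
        simp only [List.length_cons, List.length_reverse]; push_cast; ring
      rw [h1]
      by_cases hv : pvVowelChain c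
      · simp [vIdx, hv]
      · have h2 : j + 1 - ((c :: r).length : Int) = (j - 1) + 1 - (r.length : Int) := by
          simp only [List.length_cons]; push_cast; ring
        rw [h2]
        simp [vIdx, hv, ih (j - 1)]

lemma vIdx_pairwise : ∀ (cs : List Char) (i : Int), (vIdx cs i).Pairwise (· < ·) := by
  intro cs
  induction cs with
  | nil => intro i; simp [vIdx]
  | cons c r ih =>
      intro i
      simp only [vIdx]
      split
      · refine List.pairwise_cons.2 ⟨?_, ih (i + 1)⟩
        intro x hx
        have := vIdx_ge r (i + 1) x hx
        omega
      · exact ih (i + 1)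

-- A's foldl over range(0, len) equals loopA on the suffix: generalized over the prefix already read
lemma bridgeA (ws : List Char) :
    ∀ (suf pre : List Char) (st : Int × Int × Int), ws = pre ++ suf →
    (PySem.List.pyRange (pre.length) (ws.length) 1).foldl
      (fun (st : Int × Int × Int) i =>
        match PySem.List.pyGet? ws i with
        | some c =>
            if pvVowelChain c then
              if st.1 = 0 then (st.1 + 1, i, st.2.2) else (st.1 + 1, st.2.1, i)
            else st
        | none => st) st = loopA suf (pre.length) st := by
  intro suf
  induction suf with
  | nil =>
      intro pre st h
      subst h
      simp [PySem.List.pyRange_one_eq_nil, loopA]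
  | cons c r ih =>
      intro pre st h
      have hlt : (pre.length : Int) < (ws.length : Int) := by
        subst h; simp
      rw [PySem.List.pyRange_one_cons hlt, List.foldl_cons]
      have hget : PySem.List.pyGet? ws (pre.length : Int) = some c := by
        subst h; exact PySem.List.pyGet?_append_length pre r c
      rw [hget]
      have h2 : ws = (pre ++ [c]) ++ r := by simp [h]
      have hc : (pre.length : Int) + 1 = ((pre ++ [c]).length : Int) := by simp
      rw [hc, ih (pre ++ [c]) _ h2]
      simp only [loopA, List.length_append, List.length_cons, List.length_nil, Nat.cast_add,
        Nat.cast_one]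
      norm_num

-- ===== VERDICT (by name: the statement is the Claim_ definition above) =====
theorem ilez_spec : Claim_equal_ilez := by
  intro word _
  unfold Spec_ilez ilez ilez_alt
  simp only [PySem.Str.pyGet?_eq, PySem.Chars.pyGet?_eq_listPyGet?, PySem.Str.len_eq]
  have hb := bridgeA word.toList word.toList [] (0, 0, 0) (by simp)
  simp only [List.length_nil, Nat.cast_zero] at hb
  rw [hb, loopA_zero]
  rw [firstScan_eq]
  have hl := lastScan_eq word.toList.reverse ((word.toList.length : Int) - 1)
  simp only [List.reverse_reverse, List.length_reverse] at hl
  have harg : (word.toList.length : Int) - 1 + 1 - (word.toList.length : Int) = 0 := by omega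
  rw [harg] at hl
  rw [hl]
  cases hvs : vIdx word.toList 0 with
  | nil => simp
  | cons k rest =>
      have hk0 : (0 : Int) ≤ k := vIdx_ge _ _ _ (hvs ▸ List.mem_cons_self ..)
      have hpw := vIdx_pairwise word.toList 0
      rw [hvs] at hpw
      have hklt : ∀ x ∈ rest, k < x := (List.pairwise_cons.1 hpw).1
      cases hrest : rest with
      | nil =>
          subst hrest
          simp
          omega
      | cons r0 r' =>
          have hne : rest ≠ [] := by simp [hrest]
          obtain ⟨lst, hlst⟩ := List.getLast?_isSome.2 hne |> Option.isSome_iff_exists.1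
          have hlmem : lst ∈ rest := List.mem_of_getLast? hlst
          have hkl : k < lst := hklt lst hlmem
          simp only [List.getLast?_cons]
          simp only [← hrest]
          simp only [Option.getD_some]
          have hn1 : 1 + (rest.length : Int) ≠ 0 := by rw [hrest]; simp; omega
          have hn2 : 1 + (rest.length : Int) ≠ 1 := by rw [hrest]; simp; omega
          have hkne : k ≠ -1 := by omega
          have hkls : k ≠ lst := by omega
          simp [hn1, hn2, hkne]
          omega
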